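-- pv_equiv track=rewrite | github.com/ecly/kattis | timebomb/timebomb.py | get_numbers
-- ===== SOURCE A (Python) =====
-- def get_numbers(text):
--     text = text.strip().split("\n")
--     # we consider column to the left of start a space
--     spaces = [-1]
--     for i in range(len(text[0])):
--         if all(text[j][i] == " " for j in range(len(text))):
--            spaces.append(i)
--
--     # we consider column to the right of end a space
--     spaces.append(len(text[0]))
--
--     ranges = [(x+1, y) for x, y in zip(spaces, spaces[1:]) if x != y-1]
--     numbers = []
--     for x, y in ranges:
--         chars = ""
--         for j in range(len(text)):
--             for i in range(x, y):
--                 chars += text[j][i]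
--
--         numbers.append(chars)
--
--     return numbers
-- ===== SOURCE B (Python) =====
-- def get_numbers(text):
--     rows = text.strip().split("\n")
--     width = len(rows[0])
--     blank = [all(row[i] == " " for row in rows) for i in range(width)]
--     numbers = []
--     start = None
--     for i in range(width):
--         if start is None:
--             if not blank[i]:
--                 start = i
--         elif blank[i]:
--             numbers.append("".join(row[start:i] for row in rows))
--             start = None
--     if start is not None:
--         numbers.append("".join(row[start:width] for row in rows))
--     return numbers
-- ===== Notes on version B (the rewrite author's own statement) =====
-- stated objective: alternative
-- what changed: B replaces A's sentinel space-column list + zip-adjacent-pairs + range filter by a single left-to-right scan that opens a run at the first non-blank column and closes it at the next blank one, extracting each number with row slices joined row-major instead of A's per-character nested indexing loop.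
import Mathlib
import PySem

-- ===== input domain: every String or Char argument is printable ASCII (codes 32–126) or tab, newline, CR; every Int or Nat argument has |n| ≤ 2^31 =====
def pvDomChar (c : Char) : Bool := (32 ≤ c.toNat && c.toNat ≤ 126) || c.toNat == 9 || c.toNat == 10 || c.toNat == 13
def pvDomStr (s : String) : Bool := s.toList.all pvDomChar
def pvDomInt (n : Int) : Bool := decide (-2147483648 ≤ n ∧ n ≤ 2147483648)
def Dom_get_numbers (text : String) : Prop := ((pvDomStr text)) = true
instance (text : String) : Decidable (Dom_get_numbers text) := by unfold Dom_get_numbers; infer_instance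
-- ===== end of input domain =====

-- B replaces A's sentinel space-column list + zip-adjacent-pairs + range filter by a single scan
-- that opens/closes maximal non-blank column runs and extracts each number with row slices
-- (objective: alternative). Strings are handled as char lists via PySem.Chars (exact); text[j][i]
-- is ported with pyGetD, exact on Pre_ (every reached index is in range there).

-- ===== PORT A =====
def get_numbers (text : String) : List String :=
  let rows : List (List Char) := PySem.Chars.splitOn (PySem.Chars.strip text.toList) ['\n']
  let w : Nat := (rows.headD []).length   -- len(text[0]); split always returns a nonempty list
  let spaces : List Int :=
    ((PySem.List.pyRange 0 (w : Int) 1).foldl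
      (fun acc i => if rows.all (fun r => PySem.List.pyGetD r i ' ' == ' ') then acc ++ [i] else acc)
      [-1]) ++ [(w : Int)]
  let ranges : List (Int × Int) :=
    ((spaces.zip spaces.tail).filter (fun xy => xy.1 != xy.2 - 1)).map (fun xy => (xy.1 + 1, xy.2))
  ranges.map (fun xy =>
    String.ofList (rows.foldl (fun chars r =>
      chars ++ (PySem.List.pyRange xy.1 xy.2 1).foldl
        (fun cs i => cs ++ [PySem.List.pyGetD r i ' ']) []) []))

-- ===== PORT B =====
def get_numbers_alt (text : String) : List String :=
  let rows : List (List Char) := PySem.Chars.splitOn (PySem.Chars.strip text.toList) ['\n']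
  let w : Nat := (rows.headD []).length
  let blank : List Bool :=
    (List.range w).map (fun (i : Nat) => rows.all (fun r => PySem.List.pyGetD r (i : Int) ' ' == ' '))
  let extract : Nat → Nat → String := fun x y =>
    String.ofList ((rows.map (fun r => PySem.List.slice r (some (x : Int)) (some (y : Int)))).flatten)
  let st : List String × Option Nat :=
    (List.range w).foldl
      (fun st i =>
        match st.2 with
        | none => if blank.getD i true then st else (st.1, some i)
        | some x => if blank.getD i true then (st.1 ++ [extract x i], none) else st)
      ([], none)
  match st.2 with
  | none => st.1
  | some x => st.1 ++ [extract x w]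

-- ===== PRECONDITION & SPEC =====
-- Pre_: every line of the stripped text is at least as long as the first line; on the excluded
-- (ragged) inputs A raises IndexError while indexing a short line.
def Pre_get_numbers (text : String) : Prop :=
  let rows := PySem.Chars.splitOn (PySem.Chars.strip text.toList) ['\n']
  ∀ r ∈ rows, (rows.headD []).length ≤ r.length
instance (text : String) : Decidable (Pre_get_numbers text) := by unfold Pre_get_numbers; infer_instance

def pvWitness_get_numbers : String := "12 34\n56 78"

def Spec_get_numbers (text : String) (out : List String) : Prop := out = get_numbers_alt text
instance (text : String) (out : List String) : Decidable (Spec_get_numbers text out) := by unfold Spec_get_numbers; infer_instance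

-- ===== CLAIM (what is proved, stated in full; the proofs are below) =====
def Claim_equal_get_numbers : Prop := ∀ (text : String), Dom_get_numbers text → Pre_get_numbers text → Spec_get_numbers text (get_numbers text)

-- ===== LEMMAS AND PROOFS =====

-- A's range construction read off the spaces list recursively: previous space p, sentinel w.
def runsA (p w : Int) : List Int → List (Int × Int)
  | [] => (if p != w - 1 then [(p + 1, w)] else [])
  | q :: qs => (if p != q - 1 then [(p + 1, q)] else []) ++ runsA q w qs

-- B's scan: columns i..i+k-1 with open-run state, flush at i+k.
def runsB (b : Nat → Bool) : Nat → Nat → Option Nat → List (Nat × Nat)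
  | _, 0, none => []
  | i, 0, some x => [(x, i)]
  | i, k + 1, none => if b i then runsB b (i + 1) k none else runsB b (i + 1) k (some i)
  | i, k + 1, some x => if b i then (x, i) :: runsB b (i + 1) k none else runsB b (i + 1) k (some x)

-- A's zip-pairs/filter/map pipeline over the spaces list is runsA.
theorem zipRanges (l : List Int) (p w : Int) :
    (((p :: (l ++ [w])).zip (l ++ [w])).filter (fun xy => xy.1 != xy.2 - 1)).map
      (fun xy => (xy.1 + 1, xy.2)) = runsA p w l := by
  induction l generalizing p with
  | nil => simp only [List.nil_append, List.zip_cons_cons, List.zip_nil_right, List.filter_cons]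
           simp [runsA]; split_ifs <;> simp_all
  | cons q qs ih =>
      simp only [List.cons_append, List.zip_cons_cons, List.filter_cons]
      rw [runsA]
      split_ifs <;> simp_all

-- Core: A's runsA over the blank columns (prev space p) is B's scan runsB, cast to Int.
theorem runsA_eq_runsB (b : Nat → Bool) (k : Nat) :
    ∀ (i : Nat) (st : Option Nat) (p : Int), (st = none → p = (i : Int) - 1) →
    (∀ x, st = some x → x < i ∧ p = (x : Int) - 1) →
    runsA p ((i : Int) + (k : Int))
        (((List.range' i k).filter b).map (fun (n : Nat) => (n : Int)))
      = (runsB b i k st).map (fun (ab : Nat × Nat) => ((ab.1 : Int), (ab.2 : Int))) := by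
  induction k with
  | zero =>
      intro i st p hn hs
      match st with
      | none =>
          have hp := hn rfl; subst hp
          simp only [List.range', List.filter_nil, List.map_nil, runsB, runsA, Nat.cast_zero, add_zero]
          rw [if_neg (by simp)]
      | some x =>
          obtain ⟨hx, hp⟩ := hs x rfl
          subst hp
          simp only [List.range', List.filter_nil, List.map_nil, runsB, runsA, Nat.cast_zero, add_zero, List.map_cons, List.map_nil]
          rw [if_pos (by simp only [bne_iff_ne, ne_eq]; omega)]
          simp
  | succ k ih =>
      intro i st p hn hs
      rw [List.range'_succ, List.filter_cons]
      have hw : (i : Int) + ((k : Int) + 1) = ((i+1 : Nat) : Int) + (k : Int) := by push_cast; ring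
      match st with
      | none =>
          have hp := hn rfl; subst hp
          by_cases hb : b i
          · rw [if_pos hb, List.map_cons, runsA,
              if_neg (by simp), List.nil_append, runsB, if_pos hb]
            rw [Nat.cast_add, Nat.cast_one, hw]
            exact ih (i+1) none (i : Int) (by intro; push_cast; ring)
              (by intro x hx; cases hx)
          · rw [if_neg (by simp [hb]), runsB, if_neg (by simp [hb])]
            rw [Nat.cast_add, Nat.cast_one, hw]
            exact ih (i+1) (some i) ((i : Int) - 1) (by intro h; cases h)
              (by intro x hx; cases hx; exact ⟨by omega, rfl⟩)
      | some x =>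
          obtain ⟨hx, hp⟩ := hs x rfl
          subst hp
          by_cases hb : b i
          · rw [if_pos hb, List.map_cons, runsA,
              if_pos (by simp only [bne_iff_ne, ne_eq]; omega),
              runsB, if_pos hb, List.map_cons]
            rw [Nat.cast_add, Nat.cast_one, hw]
            rw [ih (i+1) none (i : Int) (by intro; push_cast; ring) (by intro y hy; cases hy)]
            rw [show ((x:Int) - 1 + 1) = (x:Int) from by ring]
            simp
          · rw [if_neg (by simp [hb]), runsB, if_neg (by simp [hb])]
            rw [Nat.cast_add, Nat.cast_one, hw]
            exact ih (i+1) (some x) ((x : Int) - 1) (by intro h; cases h)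
              (by intro y hy; cases hy; exact ⟨by omega, rfl⟩)

-- Every run (a, b) produced by the scan has a ≤ b ≤ i + k.
theorem runsB_bounds (b : Nat → Bool) (k : Nat) :
    ∀ (i : Nat) (st : Option Nat), (∀ x, st = some x → x ≤ i) →
    ∀ ab ∈ runsB b i k st, ab.1 ≤ ab.2 ∧ ab.2 ≤ i + k := by
  induction k with
  | zero =>
      intro i st h ab hab
      match st with
      | none => simp [runsB] at hab
      | some x =>
          have := h x rfl
          simp only [runsB, List.mem_singleton] at hab
          subst hab
          simp
          omega
  | succ k ih =>
      intro i st h ab hab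
      match st with
      | none =>
          rw [runsB] at hab
          split at hab
          · have := ih (i+1) none (by simp) ab hab; omega
          · have := ih (i+1) (some i) (by intro x hx; cases hx; omega) ab hab; omega
      | some x =>
          have hx := h x rfl
          rw [runsB] at hab
          split at hab
          · rcases List.mem_cons.1 hab with h1 | h1
            · subst h1; simp; omega
            · have := ih (i+1) none (by simp) ab h1; omega
          · have := ih (i+1) (some x) (by intro y hy; cases hy; omega) ab hab; omega

-- B's fold over the columns, then the final flush, is runsB mapped through the extractor.
theorem foldB (pN : Nat → Bool) (w : Nat) (ex : Nat → Nat → String) (blankL : List Bool)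
    (hbl : ∀ j, j < w → blankL.getD j true = pN j) (k : Nat) :
    ∀ (i : Nat) (acc : List String) (x? : Option Nat), i + k = w →
    (match ((List.range' i k).foldl
        (fun (st : List String × Option Nat) j =>
          match st.2 with
          | none => if blankL.getD j true then st else (st.1, some j)
          | some x => if blankL.getD j true then (st.1 ++ [ex x j], none) else st)
        (acc, x?)).2 with
     | none => ((List.range' i k).foldl
        (fun (st : List String × Option Nat) j =>
          match st.2 with
          | none => if blankL.getD j true then st else (st.1, some j)
          | some x => if blankL.getD j true then (st.1 ++ [ex x j], none) else st)
        (acc, x?)).1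
     | some x => ((List.range' i k).foldl
        (fun (st : List String × Option Nat) j =>
          match st.2 with
          | none => if blankL.getD j true then st else (st.1, some j)
          | some x => if blankL.getD j true then (st.1 ++ [ex x j], none) else st)
        (acc, x?)).1 ++ [ex x w])
    = acc ++ (runsB pN i k x?).map (fun ab => ex ab.1 ab.2) := by
  induction k with
  | zero =>
      intro i acc x? hw
      match x? with
      | none => simp [runsB]
      | some x =>
          have hiw : i = w := by omega
          subst hiw
          simp [runsB]
  | succ k ih =>
      intro i acc x? hw
      rw [List.range'_succ, List.foldl_cons]
      have hi : i < w := by omega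
      have hg : blankL.getD i true = pN i := hbl i hi
      match x? with
      | none =>
          simp only [hg]
          by_cases hb : pN i
          · rw [if_pos hb, ih (i+1) acc none (by omega), runsB, if_pos hb]
          · rw [if_neg hb, ih (i+1) acc (some i) (by omega), runsB, if_neg hb]
      | some x =>
          simp only [hg]
          by_cases hb : pN i
          · rw [if_pos hb, ih (i+1) (acc ++ [ex x i]) none (by omega), runsB, if_pos hb]
            simp
          · rw [if_neg hb, ih (i+1) acc (some x) (by omega), runsB, if_neg hb]

-- indexing a range of columns char by char = the slice, under the Pre_ length bound
theorem map_getD_range_eq_drop_take (r : List Char) (a n : Nat) (h : a + n ≤ r.length) :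
    (List.range n).map (fun k => r.getD (a + k) ' ') = (r.drop a).take n := by
  apply List.ext_getElem
  · simp; omega
  · intro j h1 h2
    simp only [List.getElem_map, List.getElem_range, List.getElem_take, List.getElem_drop]
    rw [List.getD_eq_getElem]

theorem row_chars_eq_slice (r : List Char) (a b w : Nat)
    (hab : a ≤ b) (hbw : b ≤ w) (hw : w ≤ r.length) :
    (PySem.List.pyRange (a : Int) (b : Int) 1).foldl
        (fun cs i => cs ++ [PySem.List.pyGetD r i ' ']) []
      = PySem.List.slice r (some (a : Int)) (some (b : Int)) := by
  rw [PySem.List.foldl_append_singleton_eq_map, PySem.List.slice_natCast,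
    PySem.List.pyRange_one]
  have h1 : ((b : Int) - (a : Int)).toNat = b - a := by omega
  rw [h1, List.map_map]
  have h2 : (fun k : Nat => PySem.List.pyGetD r ((a : Int) + (k : Int)) ' ')
      = fun k : Nat => r.getD (a + k) ' ' := by
    funext k
    rw [show ((a : Int) + (k : Int)) = (((a + k : Nat)) : Int) from by push_cast; ring,
      PySem.List.pyGetD_natCast]
  calc (List.range (b - a)).map ((fun k : Nat => PySem.List.pyGetD r ((k : Int)) ' ') ∘ (fun k => a + k))
      = (List.range (b - a)).map (fun k : Nat => r.getD (a + k) ' ') := by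
        apply List.map_congr_left
        intro k _
        simp only [Function.comp_def]
        rw [show ((a + k : Nat) : Int) = (a : Int) + (k : Int) from by push_cast; ring] at *
        exact congrFun h2 k
    _ = (r.drop a).take (b - a) := map_getD_range_eq_drop_take r a (b - a) (by omega)

-- ===== VERDICT (by name: the statement is the Claim_ definition above) =====
theorem get_numbers_spec : Claim_equal_get_numbers := by
  intro text _ hpre
  unfold Spec_get_numbers get_numbers get_numbers_alt
  unfold Pre_get_numbers at hpre
  simp only [] at hpre ⊢
  set rows : List (List Char) := PySem.Chars.splitOn (PySem.Chars.strip text.toList) ['\n'] with hrows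
  set w : Nat := (rows.headD []).length with hwdef
  rw [PySem.List.foldl_append_if_eq_filter]
  rw [show ∀ (l : List Int) (a : Int), ([-1] ++ l) ++ [a] = (-1) :: (l ++ [a]) from by intros; simp]
  rw [List.tail_cons, zipRanges]
  rw [PySem.List.pyRange_zero_natCast, List.filter_map, List.range_eq_range']
  rw [show ((w : Nat) : Int) = ((0 : Nat) : Int) + (w : Int) from by push_cast; ring]
  rw [runsA_eq_runsB _ _ 0 none (-1) (fun _ => by norm_num) (fun x hx => by cases hx)]
  rw [List.map_map]
  rw [show ((0 : Nat) : Int) + (w : Int) = ((w : Nat) : Int) from by push_cast; ring]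
  simp only [Function.comp_def]
  refine Eq.trans ?_ (Eq.symm (foldB
      (fun (i : Nat) => rows.all fun r => PySem.List.pyGetD r (i : Int) ' ' == ' ') w
      (fun x y => String.ofList
        (List.map (fun r => PySem.List.slice r (some (x : Int)) (some (y : Int))) rows).flatten)
      (List.map (fun (i : Nat) => rows.all fun r => PySem.List.pyGetD r (i : Int) ' ' == ' ')
        (List.range' 0 w))
      (fun j hj => by
        rw [List.getD_eq_getElem?_getD]
        simp [List.range'_eq_map_range, hj])
      w 0 [] none (Nat.zero_add w)))
  rw [List.nil_append]
  apply List.map_congr_left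
  intro ab hab
  have hb := runsB_bounds _ w 0 none (fun x hx => by cases hx) ab hab
  rw [PySem.List.foldl_append_eq_flatMap, List.nil_append]
  congr 1
  rw [List.flatMap_def]
  congr 1
  apply List.map_congr_left
  intro r hr
  exact row_chars_eq_slice r ab.1 ab.2 w (by omega) (by omega) (hpre r hr)
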